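-- pv_equiv track=rewrite | github.com/cc6980312/petAdoption | main.py | generateWordDict_bigram
-- ===== SOURCE A (Python) =====
-- def generateWordDict_bigram(content):
--     allWordDict = {0: [], 1: [], 2: [], 3: [], 4: []}
--     uniqueWordDict = set()
--     for x in range(5):
--         description_list = content[x]
--         for description in description_list:
--             allWords = description.split(" ")
--             for z in range(len(allWords) - 1):
--                 bigram = allWords[z] + " " + allWords[z + 1]
--                 allWordDict[x].append(bigram)
--                 uniqueWordDict.add(bigram)
--     return [allWordDict, uniqueWordDict]
-- ===== SOURCE B (Python) =====
-- def generateWordDict_bigram(content):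
--     # Recursive decomposition: bigrams by structural recursion on the word list,
--     # per-category lists by recursion on the description list, the five dict
--     # entries assembled back-to-front by recursion on the index list, and the
--     # unique set computed once from the concatenated stream of all bigrams.
--     def bigrams(words):
--         if len(words) < 2:
--             return []
--         return [words[0] + " " + words[1]] + bigrams(words[1:])
--
--     def cat_bigrams(descs):
--         if not descs:
--             return []
--         return bigrams(descs[0].split(" ")) + cat_bigrams(descs[1:])
--
--     def build(xs):
--         if not xs:
--             return {}, []
--         x = xs[0]
--         rest_dict, rest_all = build(xs[1:])
--         mine = cat_bigrams(content[x])
--         d = {x: mine}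
--         d.update(rest_dict)
--         return d, mine + rest_all
--
--     allWordDict, all_bigrams = build(list(range(5)))
--     uniqueWordDict = set(all_bigrams)
--     return [allWordDict, uniqueWordDict]
-- ===== Notes on version B (the rewrite author's own statement) =====
-- stated objective: alternative
-- what changed: B is a fully recursive decomposition: bigrams come from structural recursion on the word list (no index arithmetic), per-category lists from recursion on the description list, the dict is assembled back-to-front by recursion on the index list without mutation, and the unique set is computed once from the concatenated stream of all bigrams instead of element-by-element adds inside the innermost loop.
import Mathlib
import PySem

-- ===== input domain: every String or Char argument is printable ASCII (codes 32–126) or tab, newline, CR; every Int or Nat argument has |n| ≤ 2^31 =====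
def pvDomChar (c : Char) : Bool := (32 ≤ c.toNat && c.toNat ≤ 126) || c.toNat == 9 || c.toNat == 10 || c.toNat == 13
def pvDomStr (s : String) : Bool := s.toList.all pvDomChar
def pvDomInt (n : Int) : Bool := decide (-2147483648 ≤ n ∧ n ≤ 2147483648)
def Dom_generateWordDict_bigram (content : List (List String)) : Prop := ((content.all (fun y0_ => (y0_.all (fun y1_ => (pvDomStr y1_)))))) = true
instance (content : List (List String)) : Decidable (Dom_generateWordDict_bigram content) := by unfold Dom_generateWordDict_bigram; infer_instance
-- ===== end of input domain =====

-- B is a fully recursive decomposition (structural recursion for bigrams, per-category lists and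
-- the dict assembly, set computed once at the end); alternative, same cost as A.

-- ===== PORT A =====
-- the sep " " is never empty, so split? is always `some`; `.getD []` only discharges the Option
def generateWordDict_bigram (content : List (List String)) : (List (Int × List String)) × List String :=
  let allWordDict0 : PySem.Dict Int (List String) :=
    ((((PySem.Dict.empty.insert 0 []).insert 1 []).insert 2 []).insert 3 []).insert 4 []
  let st :=
    (PySem.List.pyRange 0 5 1).foldl (fun st x =>
      let description_list := PySem.List.pyGetD content x []
      description_list.foldl (fun st description =>
        let allWords := (PySem.Str.split? description " ").getD []
        (PySem.List.pyRange 0 ((allWords.length : Int) - 1) 1).foldl (fun st z =>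
          let bigram := PySem.List.pyGetD allWords z "" ++ " " ++ PySem.List.pyGetD allWords (z + 1) ""
          (st.1.modify x [] (fun l => l ++ [bigram]), PySem.Set.add st.2 bigram)) st) st)
      (allWordDict0, PySem.Set.empty)
  (st.1.items, st.2)

-- ===== PORT B =====
-- B's bigrams(): structural recursion on the word list
def pvBigramsRec : List String → List String
  | a :: b :: t => (a ++ " " ++ b) :: pvBigramsRec (b :: t)
  | _ => []

-- B's cat_bigrams(): recursion on the description list
def pvCatBigrams : List String → List String
  | [] => []
  | d :: t => pvBigramsRec ((PySem.Str.split? d " ").getD []) ++ pvCatBigrams t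

-- B's build(): recursion on the index list, assembling (dict, all-bigram stream) back-to-front
def pvBuild (content : List (List String)) : List Int → PySem.Dict Int (List String) × List String
  | [] => (PySem.Dict.empty, [])
  | x :: xs =>
    let r := pvBuild content xs
    let mine := pvCatBigrams (PySem.List.pyGetD content x [])
    (PySem.Dict.update (PySem.Dict.empty.insert x mine) r.1.items, mine ++ r.2)

def generateWordDict_bigram_alt (content : List (List String)) : (List (Int × List String)) × List String :=
  let b := pvBuild content (PySem.List.pyRange 0 5 1)
  (b.1.items, PySem.Set.ofList b.2)

-- ===== PRECONDITION & SPEC =====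
-- A indexes content[0]..content[4]; on fewer than five category lists it raises IndexError (B too).
def Pre_generateWordDict_bigram (content : List (List String)) : Prop := 5 ≤ content.length
instance (content : List (List String)) : Decidable (Pre_generateWordDict_bigram content) := by
  unfold Pre_generateWordDict_bigram; infer_instance

def pvWitness_generateWordDict_bigram : List (List String) := [["a b c"], [], ["x y"], [], ["a b"]]

def Spec_generateWordDict_bigram (content : List (List String)) (out : (List (Int × List String)) × List String) : Prop := out = generateWordDict_bigram_alt content
instance (content : List (List String)) (out : (List (Int × List String)) × List String) : Decidable (Spec_generateWordDict_bigram content out) := by unfold Spec_generateWordDict_bigram; infer_instance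

-- ===== CLAIM (what is proved, stated in full; the proofs are below) =====
def Claim_equal_generateWordDict_bigram : Prop := ∀ (content : List (List String)), Dom_generateWordDict_bigram content → Pre_generateWordDict_bigram content → Spec_generateWordDict_bigram content (generateWordDict_bigram content)

-- ===== LEMMAS AND PROOFS =====

-- A's index loop over range(len(allWords)-1) generates exactly the recursive bigram list.
theorem map_range_bigrams (ws : List String) :
    (PySem.List.pyRange 0 ((ws.length : Int) - 1) 1).map
      (fun z => PySem.List.pyGetD ws z "" ++ " " ++ PySem.List.pyGetD ws (z + 1) "") =
    pvBigramsRec ws := by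
  have hzip : ∀ ws : List String,
      (ws.zip ws.tail).map (fun p : String × String => p.1 ++ " " ++ p.2) = pvBigramsRec ws := by
    intro ws
    induction ws using pvBigramsRec.induct with
    | case1 a b t ih => simpa [pvBigramsRec] using ih
    | case2 ws h => cases ws with
      | nil => rfl
      | cons a t => cases t with
        | nil => rfl
        | cons b t => exact absurd rfl (h a b t)
  rw [← hzip]
  cases ws with
  | nil => rfl
  | cons w t =>
    have h : ((w :: t).length : Int) - 1 = ((t.length : Nat) : Int) := by simp
    rw [h, PySem.List.pyRange_zero_natCast]
    apply List.ext_getElem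
    · simp
    · intro i h1 h2
      have hcast : ((i : Int) + 1) = ((i + 1 : Nat) : Int) := by push_cast; ring
      simp only [List.getElem_map, List.getElem_range, hcast,
        PySem.List.pyGetD_natCast, List.getElem_zip]
      have hi : i < (w :: t).length := by simp at h1; simp; omega
      have hi1 : i + 1 < (w :: t).length := by simp at h1 ⊢; omega
      rw [List.getD_eq_getElem _ _ hi, List.getD_eq_getElem _ _ hi1]
      simp

-- a fold whose body consumes only the bigram at z is a fold over the bigram list
theorem foldl_range_bigrams {σ : Type} (ws : List String) (g : σ → String → σ) (init : σ) :
    (PySem.List.pyRange 0 ((ws.length : Int) - 1) 1).foldl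
      (fun st z => g st (PySem.List.pyGetD ws z "" ++ " " ++ PySem.List.pyGetD ws (z + 1) "")) init
    = (pvBigramsRec ws).foldl g init := by
  rw [← map_range_bigrams, List.foldl_map]

-- the dict component of A's loop over one category list
def catFold (x : Int) (dl : List String) (d : PySem.Dict Int (List String)) : PySem.Dict Int (List String) :=
  dl.foldl (fun d description =>
    (pvBigramsRec ((PySem.Str.split? description " ").getD [])).foldl
      (fun d b => d.modify x [] (fun l => l ++ [b])) d) d

theorem pairFold (bs : List String) (x : Int) (d : PySem.Dict Int (List String)) (s : PySem.Set String) :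
    bs.foldl (fun st b => (st.1.modify x [] (fun l => l ++ [b]), PySem.Set.add st.2 b)) (d, s)
    = (bs.foldl (fun d b => d.modify x [] (fun l => l ++ [b])) d, PySem.Set.update s bs) := by
  rw [PySem.List.foldl_prod_mk (f := fun d b => PySem.Dict.modify d x [] (fun l => l ++ [b]))
      (g := fun s b => PySem.Set.add s b)]
  rfl

theorem update_append {α : Type} [BEq α] (s : PySem.Set α) (l1 l2 : List α) :
    PySem.Set.update s (l1 ++ l2) = PySem.Set.update (PySem.Set.update s l1) l2 := by
  simp [PySem.Set.update, List.foldl_append]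

-- A's loop over one category list = (dict fold, set updated with the category's bigrams)
theorem descFold (x : Int) (dl : List String) (d : PySem.Dict Int (List String)) (s : PySem.Set String) :
    dl.foldl (fun st description =>
      (PySem.List.pyRange 0 (((((PySem.Str.split? description " ").getD []).length : Int)) - 1) 1).foldl
        (fun st z =>
          (st.1.modify x [] (fun l => l ++ [PySem.List.pyGetD ((PySem.Str.split? description " ").getD []) z "" ++ " " ++ PySem.List.pyGetD ((PySem.Str.split? description " ").getD []) (z + 1) ""]),
           PySem.Set.add st.2 (PySem.List.pyGetD ((PySem.Str.split? description " ").getD []) z "" ++ " " ++ PySem.List.pyGetD ((PySem.Str.split? description " ").getD []) (z + 1) ""))) st) (d, s)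
    = (catFold x dl d, PySem.Set.update s (pvCatBigrams dl)) := by
  induction dl generalizing d s with
  | nil => simp [catFold, pvCatBigrams, PySem.Set.update]
  | cons a l ih =>
    simp only [List.foldl_cons, pvCatBigrams]
    rw [foldl_range_bigrams ((PySem.Str.split? a " ").getD [])
        (fun st b => (st.1.modify x [] (fun l => l ++ [b]), PySem.Set.add st.2 b)) (d, s)]
    rw [pairFold, ih]
    rw [update_append]
    simp [catFold]

theorem getD_modChain (bs : List String) (x k : Int) (d : PySem.Dict Int (List String)) :
    (bs.foldl (fun d b => d.modify x [] (fun l => l ++ [b])) d).getD k []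
    = d.getD k [] ++ (if k = x then bs else []) := by
  induction bs generalizing d with
  | nil => simp
  | cons b l ih =>
    simp only [List.foldl_cons, ih, PySem.Dict.getD_modify]
    split_ifs with h
    · subst h; simp
    · simp

theorem update_const (s : PySem.Set Int) (x : Int) (n : List String) (hx : x ∈ s) :
    PySem.Set.update s (n.map fun _ => x) = s := by
  induction n with
  | nil => rfl
  | cons b l ih => simpa [PySem.Set.update, PySem.Set.add, hx] using ih

theorem keys_catFold (x : Int) (dl : List String) (d : PySem.Dict Int (List String))
    (hx : x ∈ d.keys) : (catFold x dl d).keys = d.keys := by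
  induction dl generalizing d with
  | nil => rfl
  | cons a l ih =>
    have hk : ((pvBigramsRec ((PySem.Str.split? a " ").getD [])).foldl
        (fun d b => d.modify x [] (fun l => l ++ [b])) d).keys = d.keys := by
      rw [PySem.Dict.keys_foldl_modify_key (pvBigramsRec ((PySem.Str.split? a " ").getD []))
          (fun _ => x) [] (fun _ b => fun l => l ++ [b]) d]
      exact update_const _ _ _ hx
    rw [catFold, List.foldl_cons, ← catFold]
    rw [ih _ (by rw [hk]; exact hx), hk]

theorem getD_catFold (x k : Int) (dl : List String) (d : PySem.Dict Int (List String)) :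
    (catFold x dl d).getD k [] = d.getD k [] ++ (if k = x then pvCatBigrams dl else []) := by
  induction dl generalizing d with
  | nil => simp [catFold, pvCatBigrams]
  | cons a l ih =>
    rw [catFold, List.foldl_cons, ← catFold, ih, getD_modChain]
    simp only [pvCatBigrams]
    split_ifs with h
    · simp
    · simp

def init0 : PySem.Dict Int (List String) :=
  ((((PySem.Dict.empty.insert 0 []).insert 1 []).insert 2 []).insert 3 []).insert 4 []

theorem items_five (l0 l1 l2 l3 l4 : List String) :
    (catFold 4 l4 (catFold 3 l3 (catFold 2 l2 (catFold 1 l1 (catFold 0 l0 init0))))).items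
    = [(0, pvCatBigrams l0), (1, pvCatBigrams l1), (2, pvCatBigrams l2),
       (3, pvCatBigrams l3), (4, pvCatBigrams l4)] := by
  have hinit : init0.keys = [0, 1, 2, 3, 4] := by decide
  have k0 : (catFold 0 l0 init0).keys = [0, 1, 2, 3, 4] := by
    rw [keys_catFold _ _ _ (by rw [hinit]; decide), hinit]
  have k1 : (catFold 1 l1 (catFold 0 l0 init0)).keys = [0, 1, 2, 3, 4] := by
    rw [keys_catFold _ _ _ (by rw [k0]; decide), k0]
  have k2 : (catFold 2 l2 (catFold 1 l1 (catFold 0 l0 init0))).keys = [0, 1, 2, 3, 4] := by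
    rw [keys_catFold _ _ _ (by rw [k1]; decide), k1]
  have k3 : (catFold 3 l3 (catFold 2 l2 (catFold 1 l1 (catFold 0 l0 init0)))).keys = [0, 1, 2, 3, 4] := by
    rw [keys_catFold _ _ _ (by rw [k2]; decide), k2]
  have k4 : (catFold 4 l4 (catFold 3 l3 (catFold 2 l2 (catFold 1 l1 (catFold 0 l0 init0))))).keys = [0, 1, 2, 3, 4] := by
    rw [keys_catFold _ _ _ (by rw [k3]; decide), k3]
  rw [PySem.Dict.items_eq_map_keys _ (by rw [k4]; decide) ([] : List String), k4]
  simp only [List.map_cons, List.map_nil, getD_catFold]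
  norm_num
  refine ⟨?_, ?_, ?_, ?_, ?_⟩ <;> decide

theorem set_five (b0 b1 b2 b3 b4 : List String) :
    PySem.Set.update (PySem.Set.update (PySem.Set.update (PySem.Set.update (PySem.Set.update PySem.Set.empty b0) b1) b2) b3) b4
    = PySem.Set.ofList (b0 ++ (b1 ++ (b2 ++ (b3 ++ (b4 ++ []))))) := by
  simp [PySem.Set.ofList_eq_foldl, PySem.Set.update, List.foldl_append, PySem.Set.empty]

-- B's build over the literal index list [0,1,2,3,4] yields the canonical dict items and stream
theorem build_items (content : List (List String)) :
    (pvBuild content (PySem.List.pyRange 0 5 1)).1.items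
    = [(0, pvCatBigrams (PySem.List.pyGetD content 0 [])),
       (1, pvCatBigrams (PySem.List.pyGetD content 1 [])),
       (2, pvCatBigrams (PySem.List.pyGetD content 2 [])),
       (3, pvCatBigrams (PySem.List.pyGetD content 3 [])),
       (4, pvCatBigrams (PySem.List.pyGetD content 4 []))] := by
  rfl

theorem build_stream (content : List (List String)) :
    (pvBuild content (PySem.List.pyRange 0 5 1)).2
    = pvCatBigrams (PySem.List.pyGetD content 0 []) ++ (pvCatBigrams (PySem.List.pyGetD content 1 []) ++
      (pvCatBigrams (PySem.List.pyGetD content 2 []) ++ (pvCatBigrams (PySem.List.pyGetD content 3 []) ++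
      (pvCatBigrams (PySem.List.pyGetD content 4 []) ++ [])))) := by
  rfl

theorem main_eq (content : List (List String)) :
    generateWordDict_bigram content = generateWordDict_bigram_alt content := by
  simp only [generateWordDict_bigram]
  rw [show PySem.List.pyRange 0 5 1 = [0, 1, 2, 3, 4] from rfl]
  simp only [List.foldl_cons, List.foldl_nil]
  rw [descFold, descFold, descFold, descFold, descFold]
  rw [show ((((PySem.Dict.empty.insert 0 []).insert 1 []).insert 2 []).insert 3 []).insert 4 [] = init0 from rfl]
  rw [items_five, set_five]
  simp only [generateWordDict_bigram_alt]
  rw [build_items, build_stream]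

-- ===== VERDICT (by name: the statement is the Claim_ definition above) =====
theorem generateWordDict_bigram_spec : Claim_equal_generateWordDict_bigram := by
  intro content _ _
  exact main_eq content
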